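-- pv_equiv track=rewrite | github.com/m3047/rkvdns_examples | totalizers/agent.py | asciify
-- ===== SOURCE A (Python) =====
-- MIN_GOOD_ASCII = 32
--
-- MAX_GOOD_ASCII = 126
--
-- def asciify(line):
--     """Convert nonprintables to hex and convert to unicode."""
--     converted = []
--     for c in line:
--         if c >= MIN_GOOD_ASCII and c <= MAX_GOOD_ASCII:
--             converted.append(c)
--             continue
--         converted += [ ord('\\'), ord('x') ] + [ x for x in '{:02x}'.format(c).encode() ]
--     return bytes(converted).decode()
-- ===== SOURCE B (Python) =====
-- # 256-entry lookup table: the printable/nonprintable decision and hex formatting for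
-- # byte values are done once at import time; per element it is a table index (with a
-- # format fallback only for values outside 0..255, which are not byte values).
-- _TABLE = [chr(c) if 32 <= c <= 126 else '\\x{:02x}'.format(c) for c in range(256)]
--
-- def asciify(line):
--     """Convert nonprintables to hex and convert to unicode."""
--     return ''.join(_TABLE[c] if 0 <= c < 256 else '\\x{:02x}'.format(c) for c in line)
-- ===== Notes on version B (the rewrite author's own statement) =====
-- stated objective: faster
-- what changed: Replaces the per-byte branch + byte-list accumulation + final bytes().decode() with a precomputed 256-entry table of string fragments (built once at module load) joined over the input, falling back to hex formatting only for non-byte integers.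
import Mathlib
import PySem

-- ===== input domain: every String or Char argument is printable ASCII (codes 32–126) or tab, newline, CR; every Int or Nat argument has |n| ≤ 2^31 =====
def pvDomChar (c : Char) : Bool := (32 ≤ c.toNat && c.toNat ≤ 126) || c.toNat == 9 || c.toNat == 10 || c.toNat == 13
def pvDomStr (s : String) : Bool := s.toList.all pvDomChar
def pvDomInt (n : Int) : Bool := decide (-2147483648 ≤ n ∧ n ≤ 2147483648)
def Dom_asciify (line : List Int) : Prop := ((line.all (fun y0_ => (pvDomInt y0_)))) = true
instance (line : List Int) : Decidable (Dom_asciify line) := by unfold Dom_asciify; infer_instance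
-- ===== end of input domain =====

-- B replaces A's byte-accumulator-then-decode loop by a precomputed 256-entry fragment
-- table joined over the input (objective: faster by hoisting the branch and hex
-- formatting for byte values into a one-time table).

-- Shared helper: the exact value of Python's '{:02x}'.format(c), as a char list
-- (lowercase hex of |c|, '-' first for negatives, zero-padded to total width 2;
-- Nat.toDigits 16 produces Python's lowercase hex digits of a Nat).
def hex02 (c : Int) : List Char :=
  if c < 0 then '-' :: Nat.toDigits 16 (-c).toNat
  else
    let d := Nat.toDigits 16 c.toNat
    if d.length < 2 then '0' :: d else d

-- ===== PORT A =====
-- 'converted' accumulates byte values; bytes(converted).decode() is exact here because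
-- every accumulated value is an ASCII code (32..126 or a code of '\', 'x', a hex char).
def asciify (line : List Int) : String :=
  let converted : List Int := line.foldl (fun acc c =>
    if 32 ≤ c ∧ c ≤ 126 then acc ++ [c]
    else acc ++ ([92, 120] ++ (hex02 c).map (fun ch => (ch.toNat : Int)))) []
  String.ofList (converted.map (fun b => Char.ofNat b.toNat))

-- ===== PORT B =====
-- the module-level 256-entry table _TABLE of Source B
def asciifyTable : List (List Char) :=
  (List.range 256).map (fun c =>
    if 32 ≤ c ∧ c ≤ 126 then [Char.ofNat c] else '\\' :: 'x' :: hex02 (c : Int))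

-- ''.join(...) = flatten of the fragment list
def asciify_alt (line : List Int) : String :=
  String.ofList ((line.map (fun c =>
    if 0 ≤ c ∧ c < 256 then asciifyTable.getD c.toNat []
    else '\\' :: 'x' :: hex02 c)).flatten)

-- ===== PRECONDITION & SPEC =====
def Spec_asciify (line : List Int) (out : String) : Prop := out = asciify_alt line
instance (line : List Int) (out : String) : Decidable (Spec_asciify line out) := by unfold Spec_asciify; infer_instance

-- ===== CLAIM (what is proved, stated in full; the proofs are below) =====
def Claim_equal_asciify : Prop := ∀ (line : List Int), Dom_asciify line → Spec_asciify line (asciify line)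

-- ===== LEMMAS AND PROOFS =====

-- decoding the byte codes of an ASCII char list gives it back
theorem comp_decode_encode :
    ((fun b : Int => Char.ofNat b.toNat) ∘ fun ch : Char => ((ch.toNat : Int))) = id := by
  funext ch
  simp [Char.ofNat_toNat]

-- B's table lookup at a byte value equals the direct branch
theorem table_getD (n : Nat) (h : n < 256) :
    asciifyTable.getD n [] =
      if 32 ≤ n ∧ n ≤ 126 then [Char.ofNat n] else '\\' :: 'x' :: hex02 (n : Int) := by
  unfold asciifyTable
  rw [List.getD_eq_getElem _ _ (by simpa using h)]
  simp

-- per-element: A's decoded fragment equals B's fragment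
theorem frag_eq (c : Int) :
    ((if 32 ≤ c ∧ c ≤ 126 then [c]
      else [92, 120] ++ (hex02 c).map (fun ch => (ch.toNat : Int))).map
        (fun b => Char.ofNat b.toNat))
    = (if 0 ≤ c ∧ c < 256 then asciifyTable.getD c.toNat []
       else '\\' :: 'x' :: hex02 c) := by
  by_cases hp : 32 ≤ c ∧ c ≤ 126
  · have h0 : 0 ≤ c ∧ c < 256 := ⟨by omega, by omega⟩
    rw [if_pos hp, if_pos h0, table_getD _ (by omega)]
    rw [if_pos ⟨by omega, by omega⟩]
    simp
  · rw [if_neg hp]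
    by_cases h0 : 0 ≤ c ∧ c < 256
    · rw [if_pos h0, table_getD _ (by omega)]
      rw [if_neg (by omega)]
      have hc : ((c.toNat : Int)) = c := Int.toNat_of_nonneg h0.1
      simp only [List.map_append, List.map_map, comp_decode_encode, List.map_id, hc]
      rfl
    · rw [if_neg h0]
      simp only [List.map_append, List.map_map, comp_decode_encode, List.map_id]
      rfl

-- A's loop body written as a single append, so the flatMap shape lemma applies
theorem body_eq :
    (fun (acc : List Int) c =>
      if 32 ≤ c ∧ c ≤ 126 then acc ++ [c]
      else acc ++ ([92, 120] ++ (hex02 c).map (fun ch => (ch.toNat : Int))))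
    = (fun acc c => acc ++
        (if 32 ≤ c ∧ c ≤ 126 then [c]
         else [92, 120] ++ (hex02 c).map (fun ch => (ch.toNat : Int)))) := by
  funext acc c
  split <;> rfl

-- ===== VERDICT (by name: the statement is the Claim_ definition above) =====
theorem asciify_spec : Claim_equal_asciify := by
  intro line _
  unfold Spec_asciify asciify asciify_alt
  simp only [body_eq, PySem.List.foldl_append_eq_flatMap, List.nil_append,
    List.map_flatMap, List.flatten_eq_flatMap, List.flatMap_map]
  congr 1
  apply List.flatMap_congr
  intro c _
  exact frag_eq c
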